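-- pv_equiv track=rewrite | github.com/danieltb92/python_exercise | Retos/reto4_baldosas.py | verificar_fallas
-- ===== SOURCE A (Python) =====
-- def verificar_fallas(baldosa, k):
--   fallas_totales = 0
--   fallas_detectadas = 0
--   diccionario = dict()
--   for count, value in enumerate(baldosa):
--     if (value in diccionario and count - diccionario.get(value) <= k):
--       fallas_detectadas += 1
--     if (value in diccionario):
--       fallas_totales += 1
--     diccionario[value] = count
--   return fallas_totales, fallas_detectadas
-- ===== SOURCE B (Python) =====
-- def verificar_fallas(baldosa, k):
--     pos = {}
--     for i, v in enumerate(baldosa):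
--         pos.setdefault(v, []).append(i)
--     fallas_totales = sum(len(ix) - 1 for ix in pos.values())
--     fallas_detectadas = sum(1 for ix in pos.values()
--                             for a, b in zip(ix, ix[1:]) if b - a <= k)
--     return fallas_totales, fallas_detectadas
-- ===== Notes on version B (the rewrite author's own statement) =====
-- stated objective: alternative
-- what changed: Replaces the single streaming scan with a last-seen dict by a two-phase structure: first build an index table mapping each value to its ascending list of positions, then derive the totals as sum of (group size - 1) and the detections by counting consecutive-position gaps <= k within each group.
import Mathlib
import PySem

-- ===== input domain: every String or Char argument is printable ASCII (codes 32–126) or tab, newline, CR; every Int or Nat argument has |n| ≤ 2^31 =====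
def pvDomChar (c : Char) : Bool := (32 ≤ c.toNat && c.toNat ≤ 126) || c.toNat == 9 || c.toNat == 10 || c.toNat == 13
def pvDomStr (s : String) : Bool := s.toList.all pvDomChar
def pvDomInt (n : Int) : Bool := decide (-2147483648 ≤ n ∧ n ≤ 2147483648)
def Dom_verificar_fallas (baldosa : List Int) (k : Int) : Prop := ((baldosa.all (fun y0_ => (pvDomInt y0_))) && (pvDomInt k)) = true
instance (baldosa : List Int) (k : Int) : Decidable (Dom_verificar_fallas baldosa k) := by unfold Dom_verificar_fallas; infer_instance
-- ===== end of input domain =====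

-- B replaces A's single streaming scan (last-seen dict) by an index-table pass followed
-- by a grouped pass over the position lists; same O(n) cost, different decomposition.

-- ===== PORT A =====
def verificar_fallas (baldosa : List Int) (k : Int) : Int × Int :=
  let st := (PySem.List.enumerate baldosa).foldl
    (fun (s : Int × Int × PySem.Dict Int Int) p =>
      let fd := match s.2.2.get? p.2 with
        | some j => if p.1 - j ≤ k then s.2.1 + 1 else s.2.1
        | none => s.2.1
      let ft := if s.2.2.contains p.2 then s.1 + 1 else s.1
      (ft, fd, s.2.2.insert p.2 p.1))
    (0, 0, PySem.Dict.empty)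
  (st.1, st.2.1)

-- ===== PORT B =====
-- inner loop of B: sum(1 for a, b in zip(ix, ix[1:]) if b - a <= k)
def pvDetCount (k : Int) (ix : List Int) : Int :=
  (ix.zip ix.tail).foldl (fun a p => if p.2 - p.1 ≤ k then a + 1 else a) 0

def verificar_fallas_alt (baldosa : List Int) (k : Int) : Int × Int :=
  let pos := (PySem.List.enumerate baldosa).foldl
    (fun (d : PySem.Dict Int (List Int)) p => d.modify p.2 [] (fun l => l ++ [p.1]))
    PySem.Dict.empty
  let tot := pos.values.foldl (fun a ix => a + ((ix.length : Int) - 1)) 0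
  let det := pos.values.foldl (fun a ix => a + pvDetCount k ix) 0
  (tot, det)

-- ===== PRECONDITION & SPEC =====
def Spec_verificar_fallas (baldosa : List Int) (k : Int) (out : Int × Int) : Prop := out = verificar_fallas_alt baldosa k
instance (baldosa : List Int) (k : Int) (out : Int × Int) : Decidable (Spec_verificar_fallas baldosa k out) := by unfold Spec_verificar_fallas; infer_instance

-- ===== CLAIM (what is proved, stated in full; the proofs are below) =====
def Claim_equal_verificar_fallas : Prop := ∀ (baldosa : List Int) (k : Int), Dom_verificar_fallas baldosa k → Spec_verificar_fallas baldosa k (verificar_fallas baldosa k)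

-- ===== LEMMAS AND PROOFS =====

-- the list of first components of the pairs of ps whose second component is v
def pvGrp (ps : List (Int × Int)) (v : Int) : List Int :=
  (ps.filter (fun p => p.2 == v)).map (fun p => p.1)

-- the distinct second components of ps, in first-occurrence order
def pvVals (ps : List (Int × Int)) : List Int :=
  PySem.Set.ofList (ps.map (fun p => p.2))

def pvTot (ps : List (Int × Int)) : Int :=
  ((pvVals ps).map (fun v => ((pvGrp ps v).length : Int) - 1)).sum

def pvDet (k : Int) (ps : List (Int × Int)) : Int :=
  ((pvVals ps).map (fun v => pvDetCount k (pvGrp ps v))).sum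

def pvStepA (k : Int) (s : Int × Int × PySem.Dict Int Int) (p : Int × Int) :
    Int × Int × PySem.Dict Int Int :=
  (if s.2.2.contains p.2 then s.1 + 1 else s.1,
   (match s.2.2.get? p.2 with
    | some j => if p.1 - j ≤ k then s.2.1 + 1 else s.2.1
    | none => s.2.1),
   s.2.2.insert p.2 p.1)

def pvDictA (ps : List (Int × Int)) : PySem.Dict Int Int :=
  ps.foldl (fun d p => d.insert p.2 p.1) PySem.Dict.empty

lemma pvGrp_append (ps : List (Int × Int)) (p : Int × Int) (v : Int) :
    pvGrp (ps ++ [p]) v = pvGrp ps v ++ (if p.2 = v then [p.1] else []) := by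
  simp [pvGrp, List.filter_append]
  split_ifs with h <;> simp [h]

lemma pvGrp_eq_nil_iff (ps : List (Int × Int)) (v : Int) :
    pvGrp ps v = [] ↔ v ∉ ps.map (fun p => p.2) := by
  simp only [pvGrp, List.map_eq_nil_iff, List.filter_eq_nil_iff, beq_iff_eq, List.mem_map]
  push_neg
  constructor <;> intro h p hp <;> exact h p hp

-- dict component of A's fold is the plain insert-fold
lemma pvFoldA_dict (k : Int) (ps : List (Int × Int)) (s : Int × Int × PySem.Dict Int Int) :
    (ps.foldl (pvStepA k) s).2.2 = ps.foldl (fun d p => d.insert p.2 p.1) s.2.2 := by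
  induction ps generalizing s with
  | nil => rfl
  | cons p ps ih => simp only [List.foldl_cons]; exact ih _

-- A's dict holds the last index of each value
lemma pvDictA_get (ps : List (Int × Int)) (v : Int) :
    (pvDictA ps).get? v = (pvGrp ps v).getLast? := by
  induction ps using List.reverseRecOn with
  | nil => simp [pvDictA, pvGrp, PySem.Dict.get?_empty]
  | append_singleton ps p ih =>
    have hd : pvDictA (ps ++ [p]) = (pvDictA ps).insert p.2 p.1 := by
      simp [pvDictA, List.foldl_append]
    rw [hd, PySem.Dict.get?_insert, pvGrp_append]
    by_cases h : v = p.2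
    · simp [h]
    · have h2 : ¬ p.2 = v := fun hh => h hh.symm
      simp [h, h2, ih]

-- consecutive pairs of g ++ [n], for nonempty g
lemma pvZip_concat (g : List Int) (j n : Int) (hj : g.getLast? = some j) :
    (g ++ [n]).zip (g ++ [n]).tail = g.zip g.tail ++ [(j, n)] := by
  induction g generalizing j with
  | nil => simp at hj
  | cons a g ih =>
    cases g with
    | nil => simp at hj; subst hj; simp
    | cons b g' =>
      have hj' : (b :: g').getLast? = some j := by
        simpa [List.getLast?_cons_cons] using hj
      have H := ih j hj'
      simp only [List.cons_append, List.zip_cons_cons, List.tail_cons] at H ⊢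
      rw [H]

lemma pvDetCount_concat (k : Int) (g : List Int) (j n : Int) (hj : g.getLast? = some j) :
    pvDetCount k (g ++ [n]) = pvDetCount k g + (if n - j ≤ k then 1 else 0) := by
  unfold pvDetCount
  rw [pvZip_concat g j n hj, List.foldl_append]
  simp only [List.foldl_cons, List.foldl_nil]
  split_ifs <;> omega

lemma pvDetCount_singleton (k n : Int) : pvDetCount k [n] = 0 := rfl

-- sum over a nodup list of a function changed at the single point w
lemma pvSum_update (l : List Int) (hnd : l.Nodup) (w : Int) (hw : w ∈ l)
    (f f' : Int → Int) (h : ∀ v ∈ l, v ≠ w → f' v = f v) :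
    (l.map f').sum = (l.map f).sum + (f' w - f w) := by
  induction l with
  | nil => simp at hw
  | cons a l ih =>
    rcases List.mem_cons.mp hw with rfl | hw'
    · have : ∀ v ∈ l, f' v = f v := fun v hv =>
        h v (List.mem_cons_of_mem _ hv) (fun hEq => (List.nodup_cons.mp hnd).1 (hEq ▸ hv))
      simp [List.map_congr_left this]; ring
    · have ha : a ≠ w := fun hEq => (List.nodup_cons.mp hnd).1 (hEq ▸ hw')
      have := ih (List.nodup_cons.mp hnd).2 hw' (fun v hv hne => h v (List.mem_cons_of_mem _ hv) hne)
      simp [h a (List.mem_cons_self) ha, this]; ring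

lemma pvVals_append (ps : List (Int × Int)) (p : Int × Int) :
    pvVals (ps ++ [p]) = PySem.Set.add (pvVals ps) p.2 := by
  simp [pvVals, PySem.Set.ofList_append, PySem.Set.update_cons, PySem.Set.update_nil]

lemma pvMem_vals (ps : List (Int × Int)) (v : Int) :
    v ∈ pvVals ps ↔ v ∈ ps.map (fun p => p.2) := by
  simp [pvVals, PySem.Set.mem_ofList]

-- the main invariant: A's fold computes the grouped sums
lemma pvFoldA_main (k : Int) (ps : List (Int × Int)) :
    (ps.foldl (pvStepA k) (0, 0, PySem.Dict.empty)).1 = pvTot ps ∧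
    (ps.foldl (pvStepA k) (0, 0, PySem.Dict.empty)).2.1 = pvDet k ps := by
  induction ps using List.reverseRecOn with
  | nil => simp [pvTot, pvDet, pvVals, PySem.Set.ofList]
  | append_singleton ps p ih =>
    obtain ⟨ih1, ih2⟩ := ih
    rw [List.foldl_append, List.foldl_cons, List.foldl_nil]
    have hdict : (ps.foldl (pvStepA k) (0, 0, PySem.Dict.empty)).2.2 = pvDictA ps := by
      rw [pvFoldA_dict]; rfl
    by_cases hmem : p.2 ∈ ps.map (fun q => q.2)
    · -- value seen before: group nonempty, last index j
      have hg : pvGrp ps p.2 ≠ [] := by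
        rw [Ne, pvGrp_eq_nil_iff]; simpa using hmem
      obtain ⟨j, hj⟩ : ∃ j, (pvGrp ps p.2).getLast? = some j := by
        cases hgl : (pvGrp ps p.2).getLast? with
        | none => exact absurd (List.getLast?_eq_none_iff.mp hgl) hg
        | some j => exact ⟨j, rfl⟩
      have hget : (ps.foldl (pvStepA k) (0, 0, PySem.Dict.empty)).2.2.get? p.2 = some j := by
        rw [hdict, pvDictA_get, hj]
      have hcon : (ps.foldl (pvStepA k) (0, 0, PySem.Dict.empty)).2.2.contains p.2 = true := by
        rw [PySem.Dict.contains_eq_isSome_get?, hget]; rfl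
      have hwv : p.2 ∈ pvVals ps := (pvMem_vals ps p.2).mpr hmem
      have hvals : pvVals (ps ++ [p]) = pvVals ps := by
        rw [pvVals_append]; simp [PySem.Set.add, hwv]
      have hnd : (pvVals ps).Nodup := PySem.Set.nodup_ofList _
      have hgrp_ne : ∀ v ∈ pvVals ps, v ≠ p.2 → pvGrp (ps ++ [p]) v = pvGrp ps v := by
        intro v _ hne
        have h2 : ¬ p.2 = v := fun h => hne h.symm
        rw [pvGrp_append]; simp [h2]
      have hgrp_w : pvGrp (ps ++ [p]) p.2 = pvGrp ps p.2 ++ [p.1] := by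
        rw [pvGrp_append]; simp
      constructor
      · -- totals
        rw [show (pvStepA k (ps.foldl (pvStepA k) (0,0,PySem.Dict.empty)) p).1 =
              (ps.foldl (pvStepA k) (0,0,PySem.Dict.empty)).1 + 1 by
            simp [pvStepA, hcon]]
        rw [ih1]
        unfold pvTot
        rw [hvals]
        rw [pvSum_update (pvVals ps) hnd p.2 hwv
              (fun v => ((pvGrp ps v).length : Int) - 1)
              (fun v => ((pvGrp (ps ++ [p]) v).length : Int) - 1)
              (fun v hv hne => by simp [hgrp_ne v hv hne])]
        simp [hgrp_w]
      · -- detections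
        rw [show (pvStepA k (ps.foldl (pvStepA k) (0,0,PySem.Dict.empty)) p).2.1 =
              (ps.foldl (pvStepA k) (0,0,PySem.Dict.empty)).2.1 + (if p.1 - j ≤ k then 1 else 0) by
            simp only [pvStepA, hget]; split_ifs <;> omega]
        rw [ih2]
        unfold pvDet
        rw [hvals]
        rw [pvSum_update (pvVals ps) hnd p.2 hwv
              (fun v => pvDetCount k (pvGrp ps v))
              (fun v => pvDetCount k (pvGrp (ps ++ [p]) v))
              (fun v hv hne => by simp [hgrp_ne v hv hne])]
        simp only [hgrp_w, pvDetCount_concat k (pvGrp ps p.2) j p.1 hj]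
        split_ifs <;> ring
    · -- fresh value: nothing detected, group becomes [p.1]
      have hg : pvGrp ps p.2 = [] := (pvGrp_eq_nil_iff ps p.2).mpr hmem
      have hget : (ps.foldl (pvStepA k) (0, 0, PySem.Dict.empty)).2.2.get? p.2 = none := by
        rw [hdict, pvDictA_get, hg]; rfl
      have hcon : (ps.foldl (pvStepA k) (0, 0, PySem.Dict.empty)).2.2.contains p.2 = false := by
        rw [PySem.Dict.contains_eq_isSome_get?, hget]; rfl
      have hwv : p.2 ∉ pvVals ps := fun h => hmem ((pvMem_vals ps p.2).mp h)
      have hvals : pvVals (ps ++ [p]) = pvVals ps ++ [p.2] := by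
        rw [pvVals_append]; simp [PySem.Set.add, hwv]
      have hgrp_ne : ∀ v ∈ pvVals ps, pvGrp (ps ++ [p]) v = pvGrp ps v := by
        intro v hv
        have h2 : ¬ p.2 = v := fun hEq => hwv (hEq ▸ hv)
        rw [pvGrp_append]; simp [h2]
      have hgrp_w : pvGrp (ps ++ [p]) p.2 = [p.1] := by
        rw [pvGrp_append, hg]; simp
      constructor
      · rw [show (pvStepA k (ps.foldl (pvStepA k) (0,0,PySem.Dict.empty)) p).1 =
              (ps.foldl (pvStepA k) (0,0,PySem.Dict.empty)).1 by simp [pvStepA, hcon]]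
        rw [ih1]
        unfold pvTot
        rw [hvals, List.map_append, List.sum_append,
            List.map_congr_left (fun v hv =>
              congrArg (fun g => ((List.length g : Int) - 1)) (hgrp_ne v hv))]
        simp [hgrp_w]
      · rw [show (pvStepA k (ps.foldl (pvStepA k) (0,0,PySem.Dict.empty)) p).2.1 =
              (ps.foldl (pvStepA k) (0,0,PySem.Dict.empty)).2.1 by simp [pvStepA, hget]]
        rw [ih2]
        unfold pvDet
        rw [hvals, List.map_append, List.sum_append,
            List.map_congr_left (fun v hv =>
              congrArg (pvDetCount k) (hgrp_ne v hv))]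
        simp [hgrp_w, pvDetCount_singleton]

-- B's table: getD gives the group, keys are the distinct values
lemma pvPos_eq_swap (ps : List (Int × Int)) :
    ps.foldl (fun (d : PySem.Dict Int (List Int)) p => d.modify p.2 [] (fun l => l ++ [p.1]))
      PySem.Dict.empty =
    (ps.map Prod.swap).foldl (fun d p => d.modify p.1 [] (fun l => l ++ [p.2]))
      PySem.Dict.empty := by
  rw [List.foldl_map]
  simp [Prod.swap]

lemma pvPos_getD (ps : List (Int × Int)) (v : Int) :
    (ps.foldl (fun (d : PySem.Dict Int (List Int)) p => d.modify p.2 [] (fun l => l ++ [p.1]))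
      PySem.Dict.empty).getD v [] = pvGrp ps v := by
  rw [pvPos_eq_swap, PySem.Dict.getD_foldl_modify_append]
  simp [List.filter_map, List.map_map, Function.comp_def, Prod.swap, pvGrp]

lemma pvPos_keys (ps : List (Int × Int)) :
    (ps.foldl (fun (d : PySem.Dict Int (List Int)) p => d.modify p.2 [] (fun l => l ++ [p.1]))
      PySem.Dict.empty).keys = pvVals ps := by
  rw [show (fun (d : PySem.Dict Int (List Int)) (p : Int × Int) =>
        d.modify p.2 [] (fun l => l ++ [p.1])) =
      (fun d p => d.modify ((fun q : Int × Int => q.2) p) []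
        ((fun (_ : PySem.Dict Int (List Int)) (q : Int × Int) (l : List Int) => l ++ [q.1]) d p))
      from rfl]
  rw [PySem.Dict.keys_foldl_modify_key]
  simp [pvVals, PySem.Dict.keys_empty]
  rfl

lemma pvPos_keys_nodup (ps : List (Int × Int)) :
    (ps.foldl (fun (d : PySem.Dict Int (List Int)) p => d.modify p.2 [] (fun l => l ++ [p.1]))
      PySem.Dict.empty).keys.Nodup := by
  rw [pvPos_keys]; exact PySem.Set.nodup_ofList _

lemma pvAlt_eq (baldosa : List Int) (k : Int) :
    verificar_fallas_alt baldosa k =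
      (pvTot (PySem.List.enumerate baldosa), pvDet k (PySem.List.enumerate baldosa)) := by
  unfold verificar_fallas_alt
  set ps := PySem.List.enumerate baldosa with hps
  set pos := ps.foldl
    (fun (d : PySem.Dict Int (List Int)) p => d.modify p.2 [] (fun l => l ++ [p.1]))
    PySem.Dict.empty with hpos
  have hvalues : pos.values = (pvVals ps).map (fun v => pvGrp ps v) := by
    rw [PySem.Dict.values_eq_map_keys pos (by rw [hpos]; exact pvPos_keys_nodup ps) []]
    rw [hpos, pvPos_keys]
    exact List.map_congr_left (fun v _ => pvPos_getD ps v)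
  simp only [hvalues, PySem.List.foldl_add, List.map_map]
  unfold pvTot pvDet
  simp [Function.comp_def]

-- ===== VERDICT (by name: the statement is the Claim_ definition above) =====
theorem verificar_fallas_spec : Claim_equal_verificar_fallas := by
  intro baldosa k _
  unfold Spec_verificar_fallas
  rw [pvAlt_eq]
  unfold verificar_fallas
  have h := pvFoldA_main k (PySem.List.enumerate baldosa)
  have hfold : (PySem.List.enumerate baldosa).foldl
      (fun (s : Int × Int × PySem.Dict Int Int) p =>
        let fd := match s.2.2.get? p.2 with
          | some j => if p.1 - j ≤ k then s.2.1 + 1 else s.2.1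
          | none => s.2.1
        let ft := if s.2.2.contains p.2 then s.1 + 1 else s.1
        (ft, fd, s.2.2.insert p.2 p.1))
      (0, 0, PySem.Dict.empty) =
    (PySem.List.enumerate baldosa).foldl (pvStepA k) (0, 0, PySem.Dict.empty) := rfl
  simp only [hfold]
  exact Prod.ext h.1 h.2
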